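-- pv_equiv track=rewrite | github.com/lolipopper/Fuzzy-C-Means | fuzzy_c_means.py | data_add_data
-- ===== SOURCE A (Python) =====
-- def data_add_data(data1, data2):
-- 	new_data = []
--
-- 	if(len(data1)>len(data2)):
-- 		max_len = len(data1)
-- 	else:
-- 		max_len = len(data2)
--
-- 	for i in range(max_len):
-- 		if(len(data1)<=i):
-- 			new_data.append(data2[i])
-- 		elif(len(data2)<=i):
-- 			new_data.append(data1[i])
-- 		else:
-- 			new_data.append(data1[i]+data2[i])
-- 	return new_data
-- ===== SOURCE B (Python) =====
-- def data_add_data(data1, data2):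
-- 	m = min(len(data1), len(data2))
-- 	sums = [data1[i] + data2[i] for i in range(m)]
-- 	return sums + (data1 if len(data1) > len(data2) else data2)[m:]
-- ===== Notes on version B (the rewrite author's own statement) =====
-- stated objective: simpler
-- what changed: Replaces the single index loop with a per-element length-guard branch by a comprehension summing the common prefix plus a slice copying the longer list's tail.
import Mathlib
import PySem

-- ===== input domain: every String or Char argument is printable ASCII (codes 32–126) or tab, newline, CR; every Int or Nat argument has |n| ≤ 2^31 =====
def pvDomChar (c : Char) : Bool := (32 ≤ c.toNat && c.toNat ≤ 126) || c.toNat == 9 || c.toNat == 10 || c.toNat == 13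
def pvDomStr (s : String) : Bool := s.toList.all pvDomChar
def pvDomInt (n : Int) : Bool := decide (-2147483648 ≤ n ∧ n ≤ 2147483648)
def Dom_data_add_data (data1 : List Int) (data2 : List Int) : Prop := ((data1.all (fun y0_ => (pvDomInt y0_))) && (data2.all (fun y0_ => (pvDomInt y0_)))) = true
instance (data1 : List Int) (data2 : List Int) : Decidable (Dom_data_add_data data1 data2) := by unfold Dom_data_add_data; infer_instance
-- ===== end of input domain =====

-- B replaces A's single loop with per-element length guards by a sum over the common
-- prefix plus a slice of the longer list's tail (objective: simpler).

-- ===== PORT A =====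
def data_add_data (data1 : List Int) (data2 : List Int) : List Int :=
  let maxLen : Int := if data1.length > data2.length then (data1.length : Int) else (data2.length : Int)
  (PySem.List.pyRange 0 maxLen 1).foldl (fun new_data i =>
    if (data1.length : Int) ≤ i then new_data ++ [PySem.List.pyGetD data2 i 0]
    else if (data2.length : Int) ≤ i then new_data ++ [PySem.List.pyGetD data1 i 0]
    else new_data ++ [PySem.List.pyGetD data1 i 0 + PySem.List.pyGetD data2 i 0]) []

-- ===== PORT B =====
def data_add_data_alt (data1 : List Int) (data2 : List Int) : List Int :=
  let m : Int := min (data1.length : Int) (data2.length : Int)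
  let sums := (PySem.List.pyRange 0 m 1).map
    (fun i => PySem.List.pyGetD data1 i 0 + PySem.List.pyGetD data2 i 0)
  sums ++ PySem.List.slice (if data1.length > data2.length then data1 else data2) (some m) none

-- ===== PRECONDITION & SPEC =====
def Spec_data_add_data (data1 : List Int) (data2 : List Int) (out : List Int) : Prop := out = data_add_data_alt data1 data2
instance (data1 : List Int) (data2 : List Int) (out : List Int) : Decidable (Spec_data_add_data data1 data2 out) := by unfold Spec_data_add_data; infer_instance

-- ===== CLAIM (what is proved, stated in full; the proofs are below) =====
def Claim_equal_data_add_data : Prop := ∀ (data1 : List Int) (data2 : List Int), Dom_data_add_data data1 data2 → Spec_data_add_data data1 data2 (data_add_data data1 data2)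

-- ===== LEMMAS AND PROOFS =====

-- A's fold body always appends one element; name that element.
def pvElem (data1 data2 : List Int) (i : Int) : Int :=
  if (data1.length : Int) ≤ i then PySem.List.pyGetD data2 i 0
  else if (data2.length : Int) ≤ i then PySem.List.pyGetD data1 i 0
  else PySem.List.pyGetD data1 i 0 + PySem.List.pyGetD data2 i 0

theorem data_add_data_eq_map (data1 data2 : List Int) :
    data_add_data data1 data2 =
      (PySem.List.pyRange 0 (if data1.length > data2.length then (data1.length : Int) else (data2.length : Int)) 1).map
        (pvElem data1 data2) := by
  unfold data_add_data
  rw [show (fun new_data i =>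
      if (data1.length : Int) ≤ i then new_data ++ [PySem.List.pyGetD data2 i 0]
      else if (data2.length : Int) ≤ i then new_data ++ [PySem.List.pyGetD data1 i 0]
      else new_data ++ [PySem.List.pyGetD data1 i 0 + PySem.List.pyGetD data2 i 0]) =
      (fun (new_data : List Int) i => new_data ++ [pvElem data1 data2 i]) from by
    funext nd i; unfold pvElem; split_ifs <;> rfl]
  rw [PySem.List.foldl_append_singleton_eq_map]
  simp

-- ===== VERDICT (by name: the statement is the Claim_ definition above) =====
theorem data_add_data_spec : Claim_equal_data_add_data := by
  intro data1 data2 _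
  unfold Spec_data_add_data data_add_data_alt
  rw [data_add_data_eq_map]
  set m : Int := min (data1.length : Int) (data2.length : Int) with hm
  have hm0 : (0:Int) ≤ m := by positivity
  have hsplit : PySem.List.pyRange 0 (if data1.length > data2.length then (data1.length : Int) else (data2.length : Int)) 1 =
      PySem.List.pyRange 0 m 1 ++ PySem.List.pyRange m (if data1.length > data2.length then (data1.length : Int) else (data2.length : Int)) 1 := by
    apply PySem.List.pyRange_one_append 0 m _ hm0
    split_ifs <;> simp [hm]
  rw [hsplit, List.map_append]
  congr 1
  · apply List.map_congr_left
    intro i hi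
    rw [PySem.List.mem_pyRange_one] at hi
    unfold pvElem
    have h1 : ¬ ((data1.length : Int) ≤ i) := by omega
    have h2 : ¬ ((data2.length : Int) ≤ i) := by omega
    simp [h1, h2]
  · by_cases h : data1.length > data2.length
    · have hmv : m = (data2.length : Int) := by simp [hm]; omega
      rw [if_pos h, if_pos h, hmv]
      have hcong : (PySem.List.pyRange (data2.length : Int) (data1.length : Int) 1).map (pvElem data1 data2) =
          (PySem.List.pyRange (data2.length : Int) (data1.length : Int) 1).map (fun j => PySem.List.pyGetD data1 j 0) := by
        apply List.map_congr_left
        intro i hi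
        rw [PySem.List.mem_pyRange_one] at hi
        unfold pvElem
        have h1 : ¬ ((data1.length : Int) ≤ i) := by omega
        have h2 : (data2.length : Int) ≤ i := by omega
        simp [h1, h2]
      rw [hcong, show ((data1.length : Int)) = PySem.List.len data1 from rfl,
          PySem.List.map_pyGetD_pyRange _ _ (by positivity),
          PySem.List.slice_from _ (by positivity)]
    · have hmv : m = (data1.length : Int) := by simp [hm]; omega
      rw [if_neg h, if_neg h, hmv]
      have hcong : (PySem.List.pyRange (data1.length : Int) (data2.length : Int) 1).map (pvElem data1 data2) =
          (PySem.List.pyRange (data1.length : Int) (data2.length : Int) 1).map (fun j => PySem.List.pyGetD data2 j 0) := by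
        apply List.map_congr_left
        intro i hi
        rw [PySem.List.mem_pyRange_one] at hi
        unfold pvElem
        have h1 : (data1.length : Int) ≤ i := by omega
        simp [h1]
      rw [hcong, show ((data2.length : Int)) = PySem.List.len data2 from rfl,
          PySem.List.map_pyGetD_pyRange _ _ (by positivity),
          PySem.List.slice_from _ (by positivity)]
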